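-- pv_equiv track=rewrite | github.com/twchen88/ct_research | helper.py | time_convert
-- ===== SOURCE A (Python) =====
-- def time_convert(t):
--     unit = t[-1]
--     s = ""
--     # go through the string, if it's not a digit, modify accordingly
--     for c in t[:-1]:
--         if not c.isdigit():
--             # less than or equal, ignore the sign
--             if c == ">" or c == "<":
--                 pass
--             # a range, take the longest of the range
--             elif c == "-":
--                 s = ""
--         else:
--             s += c
--     n = int(s)
--     if unit == "y":
--         return n * 12
--     else:
--         return n
-- ===== SOURCE B (Python) =====
-- def time_convert(t):
--     ds = []
--     for c in reversed(t[:-1]):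
--         if c == '-':
--             break
--         if c.isdigit():
--             ds.append(c)
--     ds.reverse()
--     n = int(''.join(ds))
--     return n * 12 if t.endswith('y') else n
-- ===== Notes on version B (the rewrite author's own statement) =====
-- stated objective: alternative
-- what changed: Replaces A's forward char-by-char scan with reset-on-dash state by a backward scan that stops at the first dash from the right (so the dash-reset state machine disappears), collecting digits in reverse and testing the unit with endswith.
-- outside the precondition, e.g. on time_convert('-'): A raises ValueError, B raises ValueError
import Mathlib
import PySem

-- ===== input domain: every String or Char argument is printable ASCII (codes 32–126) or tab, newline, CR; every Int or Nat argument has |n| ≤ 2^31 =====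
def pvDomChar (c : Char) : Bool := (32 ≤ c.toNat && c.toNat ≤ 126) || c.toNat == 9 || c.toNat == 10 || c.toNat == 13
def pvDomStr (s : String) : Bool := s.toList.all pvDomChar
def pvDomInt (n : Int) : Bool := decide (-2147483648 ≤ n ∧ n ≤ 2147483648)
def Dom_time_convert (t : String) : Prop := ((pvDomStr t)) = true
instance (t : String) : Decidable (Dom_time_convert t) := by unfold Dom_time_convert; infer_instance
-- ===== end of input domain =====

-- B scans the body backwards and stops at the first dash from the right, instead of A's
-- forward scan with reset-on-dash state; return value only.

-- ===== PORT A =====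
-- loop body of A: skip '>'/'<', reset on '-', append digits, ignore other non-digits
def tcStep (s : List Char) (c : Char) : List Char :=
  if ¬ PySem.Chars.isdigit c then
    if c = '>' ∨ c = '<' then s
    else if c = '-' then []
    else s
  else s ++ [c]

def time_convert (t : String) : Int :=
  let cs := t.toList
  let unit := (PySem.List.pyGet? cs (-1)).getD ' '      -- t[-1]; Pre_ requires a nonempty string
  let s := (PySem.List.slice cs none (some (-1))).foldl tcStep []
  let n := (PySem.Int.ofChars? s).getD 0                 -- int(s); Pre_ guarantees s holds a digit
  if unit = 'y' then n * 12 else n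

-- ===== PORT B =====
-- B's loop: walk reversed(t[:-1]), break at the first '-', append digits to ds
def tcScan (acc : List Char) : List Char → List Char
  | [] => acc
  | c :: rest =>
    if c = '-' then acc
    else tcScan (if PySem.Chars.isdigit c then acc ++ [c] else acc) rest

def time_convert_alt (t : String) : Int :=
  let ds := tcScan [] (PySem.Str.slice t none (some (-1))).toList.reverse
  let n := (PySem.Int.ofChars? ds.reverse).getD 0        -- int(''.join(ds reversed))
  if PySem.Str.endswith t "y" then n * 12 else n

-- ===== PRECONDITION & SPEC =====
-- exactly where A returns: a nonempty string whose part after the last '-' of t[:-1] contains a digit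
-- (otherwise indexing the last char raises IndexError, or int of an empty digit run raises ValueError)
def Pre_time_convert (t : String) : Prop :=
  t.toList ≠ [] ∧
  ((t.toList.dropLast.reverse.takeWhile (fun c => c ≠ '-')).any PySem.Chars.isdigit) = true
instance (t : String) : Decidable (Pre_time_convert t) := by unfold Pre_time_convert; infer_instance
def pvWitness_time_convert : String := "3-6m"

def Spec_time_convert (t : String) (out : Int) : Prop := out = time_convert_alt t
instance (t : String) (out : Int) : Decidable (Spec_time_convert t out) := by unfold Spec_time_convert; infer_instance

-- ===== CLAIM (what is proved, stated in full; the proofs are below) =====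
def Claim_equal_time_convert : Prop := ∀ (t : String), Dom_time_convert t → Pre_time_convert t → Spec_time_convert t (time_convert t)

-- ===== LEMMAS AND PROOFS =====

-- the characters after the last '-' (the whole list if no '-'); proof-side characterisation
def afterLastDash (cs : List Char) : List Char :=
  (cs.reverse.takeWhile (fun c => c ≠ '-')).reverse

lemma tcStep_eq (r : List Char) (c : Char) (hc : c ≠ '-') :
    tcStep r c = r ++ (if PySem.Chars.isdigit c then [c] else []) := by
  unfold tcStep
  by_cases h : PySem.Chars.isdigit c <;> simp [h, hc]

lemma tcStep_dash (r : List Char) : tcStep r '-' = [] := by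
  have h : PySem.Chars.isdigit '-' = false := by decide
  simp [tcStep, h]

lemma afterLastDash_append_dash (cs : List Char) : afterLastDash (cs ++ ['-']) = [] := by
  simp [afterLastDash]

lemma afterLastDash_append (cs : List Char) (c : Char) (hc : c ≠ '-') :
    afterLastDash (cs ++ [c]) = afterLastDash cs ++ [c] := by
  simp [afterLastDash, hc]

lemma afterLastDash_no_dash (cs : List Char) (h : '-' ∉ cs) : afterLastDash cs = cs := by
  unfold afterLastDash
  rw [List.takeWhile_eq_self_iff.mpr, List.reverse_reverse]
  intro c hc
  simp only [ne_eq, decide_eq_true_eq]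
  exact fun he => h (by simpa [he] using List.mem_reverse.mp hc)

lemma foldl_tcStep (cs : List Char) : ∀ init : List Char,
    cs.foldl tcStep init =
      if '-' ∈ cs then (afterLastDash cs).filter PySem.Chars.isdigit
      else init ++ cs.filter PySem.Chars.isdigit := by
  induction cs using List.reverseRecOn with
  | nil => intro init; simp
  | append_singleton cs c ih =>
    intro init
    rw [List.foldl_append]
    by_cases hc : c = '-'
    · subst hc
      simp only [List.foldl_cons, List.foldl_nil, tcStep_dash,
        afterLastDash_append_dash, List.mem_append, List.mem_singleton]
      simp
    · simp only [List.foldl_cons, List.foldl_nil]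
      rw [tcStep_eq _ _ hc, ih init, afterLastDash_append _ _ hc]
      have hc' : ¬ ('-' = c) := fun he => hc he.symm
      by_cases hm : '-' ∈ cs <;>
        simp [hm, hc', List.filter_append, List.append_assoc, List.filter_singleton]

lemma loop_eq_afterLastDash (cs : List Char) :
    cs.foldl tcStep [] = (afterLastDash cs).filter PySem.Chars.isdigit := by
  rw [foldl_tcStep]
  by_cases hm : '-' ∈ cs
  · simp [hm]
  · simp [hm, afterLastDash_no_dash cs hm]

lemma tcScan_acc : ∀ (l : List Char) (acc : List Char), tcScan acc l = acc ++ tcScan [] l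
  | [], acc => by simp [tcScan]
  | c :: rest, acc => by
    by_cases hc : c = '-'
    · simp [tcScan, hc]
    · by_cases hd : PySem.Chars.isdigit c
      · rw [show tcScan acc (c :: rest) = tcScan (acc ++ [c]) rest from by simp [tcScan, hc, hd],
            show tcScan [] (c :: rest) = tcScan [c] rest from by simp [tcScan, hc, hd],
            tcScan_acc rest (acc ++ [c]), tcScan_acc rest [c]]
        simp
      · rw [show tcScan acc (c :: rest) = tcScan acc rest from by simp [tcScan, hc, hd],
            show tcScan [] (c :: rest) = tcScan [] rest from by simp [tcScan, hc, hd],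
            tcScan_acc rest acc]

lemma tcScan_eq (cs : List Char) :
    tcScan [] cs.reverse = ((afterLastDash cs).filter PySem.Chars.isdigit).reverse := by
  induction cs using List.reverseRecOn with
  | nil => simp [tcScan, afterLastDash]
  | append_singleton cs c ih =>
    rw [List.reverse_append, List.reverse_singleton, List.singleton_append]
    by_cases hc : c = '-'
    · subst hc; simp [tcScan, afterLastDash_append_dash]
    · rw [afterLastDash_append _ _ hc]
      by_cases hd : PySem.Chars.isdigit c
      · rw [show tcScan [] (c :: cs.reverse) = tcScan [c] cs.reverse from by simp [tcScan, hc, hd],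
            tcScan_acc, ih]
        simp [List.filter_append, hd]
      · rw [show tcScan [] (c :: cs.reverse) = tcScan [] cs.reverse from by simp [tcScan, hc, hd], ih]
        simp [List.filter_append, hd]

lemma endswith_y (cs : List Char) (h : cs ≠ []) :
    PySem.Chars.endswith cs ['y'] = ((cs.getLast?).getD ' ' == 'y') := by
  induction cs using List.reverseRecOn with
  | nil => simp at h
  | append_singleton cs c _ =>
    by_cases hc : c = 'y'
    · subst hc
      have h1 : PySem.Chars.endswith (cs ++ ['y']) ['y'] = true :=
        (PySem.Chars.endswith_iff _ _).mpr ⟨cs, rfl⟩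
      simp [h1]
    · have hns : ¬ (['y'] <:+ cs ++ [c]) := by
        rintro ⟨pre, hpre⟩
        have hl : pre.length = cs.length := by
          have := congrArg List.length hpre; simpa using this
        have h2 := List.append_inj_right hpre hl
        exact hc (by simpa using h2.symm)
      have he : PySem.Chars.endswith (cs ++ [c]) ['y'] = false := by
        rw [Bool.eq_false_iff]
        intro hE
        exact hns ((PySem.Chars.endswith_iff _ _).mp hE)
      simp [he, hc]

-- ===== VERDICT (by name: the statement is the Claim_ definition above) =====
theorem time_convert_spec : Claim_equal_time_convert := by
  intro t _ hpre
  unfold Spec_time_convert time_convert time_convert_alt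
  simp only [PySem.Str.endswith_eq, PySem.Str.toList_slice, PySem.Chars.slice_eq_listSlice,
    show ("y".toList) = ['y'] from rfl]
  rw [endswith_y t.toList hpre.1, loop_eq_afterLastDash, tcScan_eq, List.reverse_reverse]
  simp [PySem.List.pyGet?_neg_one, beq_iff_eq]
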